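-- pv_equiv track=rewrite | github.com/ThomasTrepanier/log6307-final-project | data/pyscent/stackoverflow/code-dump/20866_7.py | new_line_better
-- ===== SOURCE A (Python) =====
-- def new_line_better(sentence: str, n: int):
--     # final string as list for efficiency
--     final_str = []
--     # split at period and remove extra spaces
--     sentence_split = list( map( lambda x : x.strip(),  sentence.split('.') ) )
--     # pop off last space
--     sentence_split.pop()
--
--     # keeps track
--     count = 0
--     # traverse the sentences
--     for sentence in sentence_split:
--         count += 1
--         if count == n:
--             count = 0
--             final_str.append(sentence+'.\n')
--         else:
--             final_str.append(sentence+'. ')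
--
--     # return the string version of the list
--     return ''.join(final_str)
-- ===== SOURCE B (Python) =====
-- def new_line_better(sentence: str, n: int):
--     # split at periods, strip each piece, drop the piece after the last period
--     parts = [p.strip() for p in sentence.split('.')]
--     parts.pop()
--     if n <= 0:
--         # the counter can never reach a non-positive n: every sentence gets '. '
--         return ''.join(p + '. ' for p in parts)
--     out = []
--     while parts:
--         group, parts = parts[:n], parts[n:]
--         if len(group) == n:
--             out.append('. '.join(group) + '.\n')
--         else:
--             out.append(''.join(p + '. ' for p in group))
--     return ''.join(out)
-- ===== Notes on version B (the rewrite author's own statement) =====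
-- stated objective: alternative
-- what changed: A walks the stripped pieces with a running counter that resets at n; B has no counter: it peels the piece list into groups of n, emitting '. '.join(group)+'. ' for each full group and per-piece '. ' suffixes for a short trailing group (with an n<=0 branch where no group ever completes).
import Mathlib
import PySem

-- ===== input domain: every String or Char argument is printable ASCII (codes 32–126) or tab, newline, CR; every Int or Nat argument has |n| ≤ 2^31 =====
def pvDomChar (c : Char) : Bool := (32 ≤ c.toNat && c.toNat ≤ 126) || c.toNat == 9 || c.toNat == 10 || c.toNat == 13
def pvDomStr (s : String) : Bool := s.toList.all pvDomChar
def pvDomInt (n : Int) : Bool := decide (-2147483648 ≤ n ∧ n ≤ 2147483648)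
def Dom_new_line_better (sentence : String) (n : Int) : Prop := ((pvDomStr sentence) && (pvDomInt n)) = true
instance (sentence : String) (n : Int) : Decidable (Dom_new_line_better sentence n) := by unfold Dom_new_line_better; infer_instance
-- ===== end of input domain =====

-- B replaces A's per-element counter loop by processing the stripped pieces in groups of n
-- (full groups joined with '. ' and closed by '.\n', a short trailing group kept as '. ' pieces);
-- objective: a different decomposition of the same task, no speed claim.

-- ===== PORT A =====
def new_line_better (sentence : String) (n : Int) : String :=
  -- split at period and strip each piece; '.'.split never fails, so getD [] is never taken
  let sentence_split := ((PySem.Str.split? sentence ".").getD []).map PySem.Str.strip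
  -- sentence_split.pop(): drops the last element (the popped value is unused)
  let sentence_split := sentence_split.dropLast
  -- for-loop with the counter, carried as state (count, final_str)
  let st := sentence_split.foldl
    (fun (st : Int × List String) s =>
      let count := st.1 + 1
      if count = n then (0, st.2 ++ [s ++ ".\n"])
      else (count, st.2 ++ [s ++ ". "])) ((0 : Int), ([] : List String))
  PySem.Str.join "" st.2

-- ===== PORT B =====
-- B's while-loop: peel parts[:n] / parts[n:] (for n ≥ 1: p :: take (n-1) ps / drop (n-1) ps)
def nlbChunks (n : Nat) : List String → List String
  | [] => []
  | p :: ps =>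
    let group := p :: ps.take (n - 1)
    let rest := ps.drop (n - 1)
    (if group.length = n then PySem.Str.join ". " group ++ ".\n"
     else PySem.Str.join "" (group.map (· ++ ". "))) :: nlbChunks n rest
termination_by l => l.length
decreasing_by simp

def new_line_better_alt (sentence : String) (n : Int) : String :=
  let parts := (((PySem.Str.split? sentence ".").getD []).map PySem.Str.strip).dropLast
  if n ≤ 0 then PySem.Str.join "" (parts.map (· ++ ". "))
  else PySem.Str.join "" (nlbChunks n.toNat parts)

-- ===== PRECONDITION & SPEC =====
def Spec_new_line_better (sentence : String) (n : Int) (out : String) : Prop := out = new_line_better_alt sentence n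
instance (sentence : String) (n : Int) (out : String) : Decidable (Spec_new_line_better sentence n out) := by unfold Spec_new_line_better; infer_instance

-- ===== CLAIM (what is proved, stated in full; the proofs are below) =====
def Claim_equal_new_line_better : Prop := ∀ (sentence : String) (n : Int), Dom_new_line_better sentence n → Spec_new_line_better sentence n (new_line_better sentence n)

-- ===== LEMMAS AND PROOFS =====

-- A's loop step, named for the lemmas (definitionally the lambda used in the port)
def nlbStep (n : Int) (st : Int × List String) (s : String) : Int × List String :=
  let count := st.1 + 1
  if count = n then (0, st.2 ++ [s ++ ".\n"])
  else (count, st.2 ++ [s ++ ". "])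

-- flatten to characters: ''.join at the List Char level
def nlbJ (xs : List String) : List Char := (xs.map String.toList).flatten

theorem nlbJ_append (xs ys : List String) : nlbJ (xs ++ ys) = nlbJ xs ++ nlbJ ys := by
  simp [nlbJ]

theorem join_empty_toList (xs : List String) :
    (PySem.Str.join "" xs).toList = nlbJ xs := by
  rw [PySem.Str.toList_join]
  induction xs with
  | nil => simp [nlbJ, PySem.Chars.join_nil]
  | cons p rest ih =>
    cases rest with
    | nil => simp [nlbJ, PySem.Chars.join_singleton]
    | cons q r =>
      rw [List.map_cons, List.map_cons, PySem.Chars.join_cons_cons]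
      rw [List.map_cons] at ih
      simp [nlbJ] at ih ⊢
      simpa using ih

-- A's loop when the counter never hits n: every piece gets '. '
theorem foldl_step_none (n : Int) :
    ∀ (g : List String) (c : Int) (acc : List String),
      (∀ i : Int, c < i → i ≤ c + g.length → i ≠ n) →
      g.foldl (nlbStep n) (c, acc) = (c + g.length, acc ++ g.map (· ++ ". ")) := by
  intro g
  induction g with
  | nil => intro c acc _; simp
  | cons s rest ih =>
    intro c acc h
    have hne : c + 1 ≠ n := h (c + 1) (by omega) (by simp only [List.length_cons]; push_cast; omega)
    have := ih (c + 1) (acc ++ [s ++ ". "]) (by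
      intro i h1 h2
      refine h i (by omega) ?_
      simp only [List.length_cons]
      push_cast at h2 ⊢
      omega)
    simp only [List.foldl_cons, nlbStep, if_neg hne] at *
    rw [this]
    simp
    omega

-- a full chunk: the last of the n pieces gets '.\n', the counter resets to 0
def nlbEmit : List String → List String
  | [] => []
  | [s] => [s ++ ".\n"]
  | s :: t :: rest => (s ++ ". ") :: nlbEmit (t :: rest)

theorem foldl_step_full (n : Int) :
    ∀ (g : List String) (c : Int) (acc : List String),
      0 ≤ c → c + g.length = n → g ≠ [] →
      g.foldl (nlbStep n) (c, acc) = (0, acc ++ nlbEmit g) := by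
  intro g
  induction g with
  | nil => intro c acc _ _ h; exact absurd rfl h
  | cons s rest ih =>
    intro c acc hc hn _
    cases rest with
    | nil =>
      have : c + 1 = n := by simp at hn; omega
      simp [nlbStep, nlbEmit, this]
    | cons t r =>
      have hne : c + 1 ≠ n := by simp at hn; omega
      have := ih (c + 1) (acc ++ [s ++ ". "]) (by omega) (by simp at hn ⊢; omega) (by simp)
      simp only [List.foldl_cons, nlbStep, if_neg hne] at *
      rw [this]
      simp [nlbEmit]

-- characters of a full chunk's emission = '. '.join(group) + '.\n'
theorem emit_toList (g : List String) (hg : g ≠ []) :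
    nlbJ (nlbEmit g) = (PySem.Str.join ". " g ++ ".\n").toList := by
  rw [String.toList_append, PySem.Str.toList_join]
  induction g with
  | nil => exact absurd rfl hg
  | cons s rest ih =>
    cases rest with
    | nil => simp [nlbEmit, nlbJ, PySem.Chars.join_singleton]
    | cons t r =>
      rw [List.map_cons, List.map_cons, PySem.Chars.join_cons_cons]
      have := ih (by simp)
      rw [List.map_cons] at this
      simp [nlbEmit, nlbJ] at this ⊢
      rw [this]

theorem nlbJ_singleton (x : String) : nlbJ [x] = x.toList := by simp [nlbJ]

theorem nlbChunks_nil (n : Nat) : nlbChunks n [] = [] := by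
  rw [nlbChunks.eq_def]

theorem nlbChunks_cons (n : Nat) (p : String) (ps : List String) :
    nlbChunks n (p :: ps) =
      (if (p :: ps.take (n - 1)).length = n
       then PySem.Str.join ". " (p :: ps.take (n - 1)) ++ ".\n"
       else PySem.Str.join "" ((p :: ps.take (n - 1)).map (· ++ ". "))) ::
      nlbChunks n (ps.drop (n - 1)) := by
  rw [nlbChunks.eq_def]

-- main invariant for n ≥ 1: A's loop from count 0 flattens to B's chunk list
theorem foldl_chunks (n : Int) (hn : 1 ≤ n) :
    ∀ (k : Nat) (parts : List String), parts.length ≤ k → ∀ acc : List String,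
      nlbJ (parts.foldl (nlbStep n) (0, acc)).2 = nlbJ acc ++ nlbJ (nlbChunks n.toNat parts) := by
  intro k
  induction k with
  | zero =>
    intro parts h acc
    have : parts = [] := List.eq_nil_of_length_eq_zero (by omega)
    subst this
    simp [nlbChunks_nil, nlbJ]
  | succ k ih =>
    intro parts hlen acc
    cases parts with
    | nil => simp [nlbChunks_nil, nlbJ]
    | cons p ps =>
      have hm : (n.toNat : Int) = n := Int.toNat_of_nonneg (by omega)
      by_cases hfull : n.toNat ≤ (p :: ps).length
      · -- a full first chunk of n pieces
        have hsplit : p :: ps = (p :: ps.take (n.toNat - 1)) ++ ps.drop (n.toNat - 1) := by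
          simp [List.take_append_drop]
        have hglen : (p :: ps.take (n.toNat - 1)).length = n.toNat := by
          simp at hfull ⊢
          omega
        conv_lhs => rw [hsplit]
        rw [List.foldl_append]
        rw [foldl_step_full n _ 0 acc (le_refl 0) (by rw [hglen]; omega) (by simp)]
        rw [ih (ps.drop (n.toNat - 1)) (by simp at hlen ⊢; omega)]
        rw [nlbChunks_cons]
        simp only [hglen, if_pos]
        rw [nlbJ_append]
        rw [emit_toList _ (by simp)]
        simp [nlbJ, List.append_assoc]
      · -- a short trailing chunk: counter never reaches n
        have hshort : (p :: ps).length < n.toNat := by omega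
        have hlen2 : ((p :: ps).length : Int) < n := by
          rw [← hm]; exact_mod_cast hshort
        rw [foldl_step_none n (p :: ps) 0 acc (by intro i h1 h2; omega)]
        have hdrop : ps.drop (n.toNat - 1) = [] := List.drop_eq_nil_of_le (by simp at hshort; omega)
        have htake : ps.take (n.toNat - 1) = ps := List.take_of_length_le (by simp at hshort; omega)
        rw [nlbChunks_cons]
        simp only [htake, hdrop]
        rw [if_neg (by simp at hshort ⊢; omega)]
        rw [nlbChunks_nil, nlbJ_append]
        rw [nlbJ_singleton, join_empty_toList]

-- ===== VERDICT (by name: the statement is the Claim_ definition above) =====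
theorem new_line_better_spec : Claim_equal_new_line_better := by
  intro sentence n _
  unfold Spec_new_line_better new_line_better new_line_better_alt
  set parts := (((PySem.Str.split? sentence ".").getD []).map PySem.Str.strip).dropLast with hparts
  apply String.toList_inj.mp
  by_cases hn : n ≤ 0
  · rw [if_pos hn]
    have := foldl_step_none n parts 0 [] (by intro i h1 h2; omega)
    show (PySem.Str.join "" (parts.foldl (nlbStep n) (0, [])).2).toList = _
    rw [this]
    simp
  · rw [if_neg hn]
    have := foldl_chunks n (by omega) parts.length parts (le_refl _) []
    show (PySem.Str.join "" (parts.foldl (nlbStep n) (0, [])).2).toList = _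
    rw [join_empty_toList, join_empty_toList, this]
    simp [nlbJ]
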